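-- pv_equiv track=rewrite | github.com/pleelapr/a-sdlc | src/a_sdlc/server/quality_tools.py | classify_depth
-- ===== SOURCE A (Python) =====
-- BEHAVIORAL_KEYWORDS: frozenset[str] = frozenset({
--     "enforce",
--     "block",
--     "deny",
--     "pause",
--     "trigger",
--     "alert",
--     "validate",
--     "prevent",
--     "must not",
--     "reject",
--     "escalate",
--     "track",
-- })
--
-- INTEGRATION_KEYWORDS: frozenset[str] = frozenset({
--     "respects",
--     "uses from",
--     "depends on",
--     "integrates with",
--     "informed by",
-- })
--
-- def classify_depth(text: str) -> str:
--     """Classify a requirement's depth from its summary text.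
--
--     Uses deterministic keyword matching with priority:
--     behavioral > integration > structural (default).
--
--     When the text matches both behavioral and structural keywords,
--     behavioral wins (as specified by the ambiguity rule).
--
--     Args:
--         text: The requirement summary text.
--
--     Returns:
--         One of "behavioral", "integration", or "structural".
--     """
--     lower = text.lower()
--
--     # Check behavioral first (highest priority)
--     for kw in BEHAVIORAL_KEYWORDS:
--         if kw in lower:
--             return "behavioral"
--
--     # Check integration second
--     for kw in INTEGRATION_KEYWORDS:
--         if kw in lower:
--             return "integration"
--
--     # Default to structural
--     return "structural"
-- ===== SOURCE B (Python) =====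
-- BEHAVIORAL_KEYWORDS = (
--     "enforce", "block", "deny", "pause", "trigger", "alert",
--     "validate", "prevent", "must not", "reject", "escalate", "track",
-- )
--
-- INTEGRATION_KEYWORDS = (
--     "respects", "uses from", "depends on", "integrates with", "informed by",
-- )
--
--
-- def classify_depth(text: str) -> str:
--     # Single left-to-right scan: at each position check whether any keyword
--     # starts there, accumulating one flag per category; classify at the end.
--     lower = text.lower()
--     has_beh = False
--     has_int = False
--     for i in range(len(lower)):
--         if not has_beh and lower.startswith(BEHAVIORAL_KEYWORDS, i):
--             has_beh = True
--         if not has_int and lower.startswith(INTEGRATION_KEYWORDS, i):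
--             has_int = True
--     if has_beh:
--         return "behavioral"
--     if has_int:
--         return "integration"
--     return "structural"
-- ===== Notes on version B (the rewrite author's own statement) =====
-- stated objective: alternative
-- what changed: B replaces A's per-keyword substring searches (one full scan of the text per keyword) with a single left-to-right scan over text positions, testing at each position whether any keyword of either category starts there and accumulating one flag per category.
import Mathlib
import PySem

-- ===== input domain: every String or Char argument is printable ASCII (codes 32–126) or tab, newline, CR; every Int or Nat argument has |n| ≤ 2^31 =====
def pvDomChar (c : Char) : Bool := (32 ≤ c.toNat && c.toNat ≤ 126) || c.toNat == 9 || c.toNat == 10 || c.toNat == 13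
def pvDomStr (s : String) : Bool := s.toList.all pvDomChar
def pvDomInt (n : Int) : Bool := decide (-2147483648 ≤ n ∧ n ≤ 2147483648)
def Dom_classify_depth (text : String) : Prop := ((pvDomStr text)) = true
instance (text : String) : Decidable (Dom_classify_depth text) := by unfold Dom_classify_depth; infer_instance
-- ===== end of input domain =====

-- ===== PORT A =====
-- B changes the traversal: one left-to-right scan over positions with per-category
-- flags, instead of A's per-keyword substring searches (objective: alternative).
def pvBehKws : List (List Char) :=
  ["enforce".toList, "block".toList, "deny".toList, "pause".toList, "trigger".toList,
   "alert".toList, "validate".toList, "prevent".toList, "must not".toList,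
   "reject".toList, "escalate".toList, "track".toList]

def pvIntKws : List (List Char) :=
  ["respects".toList, "uses from".toList, "depends on".toList,
   "integrates with".toList, "informed by".toList]

def classify_depth (text : String) : String :=
  let lower := (PySem.Str.lower text).toList
  -- for kw in BEHAVIORAL_KEYWORDS: if kw in lower: return "behavioral"
  if pvBehKws.any (fun kw => PySem.Chars.isIn kw lower) then "behavioral"
  -- for kw in INTEGRATION_KEYWORDS: if kw in lower: return "integration"
  else if pvIntKws.any (fun kw => PySem.Chars.isIn kw lower) then "integration"
  else "structural"

-- ===== PORT B =====
-- the `for i in range(len(lower))` loop of Source B: recursion on the suffix starting at i,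
-- carrying the two flags (has_beh, has_int)
def pvScan : List Char → Bool → Bool → Bool × Bool
  | [], hb, hi => (hb, hi)
  | c :: rest, hb, hi =>
      pvScan rest
        (hb || pvBehKws.any (fun k => PySem.Chars.startswith (c :: rest) k))
        (hi || pvIntKws.any (fun k => PySem.Chars.startswith (c :: rest) k))

def classify_depth_alt (text : String) : String :=
  let lower := (PySem.Str.lower text).toList
  let flags := pvScan lower false false
  if flags.1 then "behavioral"
  else if flags.2 then "integration"
  else "structural"

-- ===== PRECONDITION & SPEC =====
def Spec_classify_depth (text : String) (out : String) : Prop := out = classify_depth_alt text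
instance (text : String) (out : String) : Decidable (Spec_classify_depth text out) := by unfold Spec_classify_depth; infer_instance

-- ===== CLAIM (what is proved, stated in full; the proofs are below) =====
def Claim_equal_classify_depth : Prop := ∀ (text : String), Dom_classify_depth text → Spec_classify_depth text (classify_depth text)

-- ===== LEMMAS AND PROOFS =====

theorem any_startswith_cons (kws : List (List Char)) (c : Char) (rest : List Char) :
    (kws.any (fun k => PySem.Chars.startswith (c :: rest) k)
      || kws.any (fun k => PySem.Chars.isIn k rest))
      = kws.any (fun k => PySem.Chars.isIn k (c :: rest)) := by
  rw [Bool.eq_iff_iff]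
  simp only [Bool.or_eq_true, List.any_eq_true, PySem.Chars.startswith_iff,
    PySem.Chars.isIn_iff_infix, List.infix_cons_iff]
  constructor
  · rintro (⟨k, hk, h⟩ | ⟨k, hk, h⟩)
    · exact ⟨k, hk, Or.inl h⟩
    · exact ⟨k, hk, Or.inr h⟩
  · rintro ⟨k, hk, h | h⟩
    · exact Or.inl ⟨k, hk, h⟩
    · exact Or.inr ⟨k, hk, h⟩

theorem pvScan_spec (cs : List Char) (hb hi : Bool) :
    pvScan cs hb hi
      = (hb || pvBehKws.any (fun k => PySem.Chars.isIn k cs),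
         hi || pvIntKws.any (fun k => PySem.Chars.isIn k cs)) := by
  induction cs generalizing hb hi with
  | nil =>
    have h1 : pvBehKws.any (fun k => PySem.Chars.isIn k ([] : List Char)) = false := by decide
    have h2 : pvIntKws.any (fun k => PySem.Chars.isIn k ([] : List Char)) = false := by decide
    simp [pvScan, h1, h2]
  | cons c rest ih =>
    rw [pvScan, ih]
    rw [Bool.or_assoc, Bool.or_assoc,
        any_startswith_cons pvBehKws c rest,
        any_startswith_cons pvIntKws c rest]

-- ===== VERDICT (by name: the statement is the Claim_ definition above) =====
theorem classify_depth_spec : Claim_equal_classify_depth := by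
  intro text _
  show classify_depth text = classify_depth_alt text
  simp only [classify_depth, classify_depth_alt, pvScan_spec, Bool.false_or]
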